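-- pv_equiv track=rewrite | github.com/ArchPrak/capstone | src/RestoreModel.py | encode_vars
-- ===== SOURCE A (Python) =====
-- import string
--
-- def encode_vars(expr):
--   """ Function to map variables to a smaller set of alphabets """
--   chars = string.ascii_lowercase
--   d = dict()
--   expr_list = list(expr)
--   j = 0
--   for i in range(len(expr)):
--     if expr[i].isalpha():
--       if expr[i] not in d:
--         d[expr[i]] = chars[j]
--         j += 1
--       expr_list[i] = d[expr[i]]
--
--   return "".join(expr_list)
-- ===== SOURCE B (Python) =====
-- import string
--
-- def encode_vars(expr):
--   """ Function to map variables to a smaller set of alphabets """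
--   chars = string.ascii_lowercase
--   def code(c):
--     # rank of c = number of distinct letters strictly before c's first occurrence
--     return chars[len({x for x in expr[:expr.index(c)] if x.isalpha()})]
--   return "".join(code(c) if c.isalpha() else c for c in expr)
-- ===== Notes on version B (the rewrite author's own statement) =====
-- stated objective: alternative
-- what changed: Removes A's dict/state machine entirely: B computes each letter's code independently by a closed form -- chars[number of distinct letters in the prefix before the letter's first occurrence] -- so there is no mapping table or mutable list at all, trading A's O(n) single pass for an O(n^2) per-character formula.
import Mathlib
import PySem

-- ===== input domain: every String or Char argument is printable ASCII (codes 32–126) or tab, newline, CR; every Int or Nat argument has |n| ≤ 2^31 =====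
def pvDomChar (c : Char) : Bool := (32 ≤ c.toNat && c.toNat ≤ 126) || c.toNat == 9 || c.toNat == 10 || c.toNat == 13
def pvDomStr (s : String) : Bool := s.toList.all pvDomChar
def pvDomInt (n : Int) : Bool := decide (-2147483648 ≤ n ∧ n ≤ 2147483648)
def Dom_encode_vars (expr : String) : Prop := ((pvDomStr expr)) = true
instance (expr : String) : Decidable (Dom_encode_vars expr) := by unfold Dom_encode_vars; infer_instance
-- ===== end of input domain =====

-- B drops A's dict entirely: each letter's code is computed by a per-character closed form
-- (count of distinct letters before its first occurrence); objective: alternative (dict-free, O(n^2) vs A's O(n)).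

-- string.ascii_lowercase (module constant used by both versions)
def asciiLower : List Char := "abcdefghijklmnopqrstuvwxyz".toList

-- ===== PORT A =====
-- loop body of A's 'for i in range(len(expr))'; state = (d, expr_list, j)
def stepA (el : List Char) (st : PySem.Dict Char Char × List Char × Int) (i : Int) :
    PySem.Dict Char Char × List Char × Int :=
  let c := PySem.List.pyGetD el i ' '   -- expr[i]; i is always in range here
  if PySem.Chars.isalpha c then
    let dj := if st.1.contains c then (st.1, st.2.2)
              -- chars[j]: the '?' default is unreachable under Pre_ (j < 26 there; in Python j ≥ 26 raises IndexError)
              else (st.1.insert c ((PySem.List.pyGet? asciiLower st.2.2).getD '?'), st.2.2 + 1)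
    (dj.1, PySem.List.pySetD st.2.1 i (dj.1.getD c '?'), dj.2)
  else st

def encode_vars (expr : String) : String :=
  let el := expr.toList
  let st := (PySem.List.pyRange 0 (PySem.Str.len expr) 1).foldl (stepA el) (PySem.Dict.empty, el, 0)
  String.mk st.2.1

-- ===== PORT B =====
def encode_vars_alt (expr : String) : String :=
  let el := expr.toList
  -- code(c) = chars[len({x for x in expr[:expr.index(c)] if x.isalpha()})]
  let code := fun (c : Char) =>
    -- expr.index(c): the getD 0 default is unreachable (c is drawn from expr, so it occurs);
    -- expr[:k] with the nonnegative first-occurrence index k is List.take k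
    let first := (PySem.List.index? el c).getD 0
    (PySem.List.pyGet? asciiLower
      (((PySem.Set.ofList ((el.take first).filter PySem.Chars.isalpha)).length : Int))).getD '?'
  String.mk (el.map (fun c => if PySem.Chars.isalpha c then code c else c))

-- ===== PRECONDITION & SPEC =====
-- Pre_ excludes exactly the inputs with more than 26 distinct letters, on which Python A raises IndexError (chars[j] with j = 26).
def Pre_encode_vars (expr : String) : Prop :=
  (PySem.List.dedup (expr.toList.filter PySem.Chars.isalpha)).length ≤ 26
instance (expr : String) : Decidable (Pre_encode_vars expr) := by unfold Pre_encode_vars; infer_instance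

def pvWitness_encode_vars : String := "X*Y + 2x"

def Spec_encode_vars (expr : String) (out : String) : Prop := out = encode_vars_alt expr
instance (expr : String) (out : String) : Decidable (Spec_encode_vars expr out) := by unfold Spec_encode_vars; infer_instance

-- ===== CLAIM (what is proved, stated in full; the proofs are below) =====
def Claim_equal_encode_vars : Prop := ∀ (expr : String), Dom_encode_vars expr → Pre_encode_vars expr → Spec_encode_vars expr (encode_vars expr)

-- ===== LEMMAS AND PROOFS =====

-- A's evolving dict as an explicit association list: letter ↦ chars[position], positions starting at j
def pairsT (j : Int) : List Char → List (Char × Char)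
  | [] => []
  | c :: P => (c, (PySem.List.pyGet? asciiLower j).getD '?') :: pairsT (j + 1) P

def tblT (P : List Char) : PySem.Dict Char Char := PySem.Dict.mk (pairsT 0 P)

-- A's loop as a structural recursion over the remaining characters
def goA : PySem.Dict Char Char → Int → List Char → PySem.Dict Char Char × List Char × Int
  | d, j, [] => (d, [], j)
  | d, j, c :: cs =>
    if PySem.Chars.isalpha c then
      let dj := if d.contains c then (d, j) else (d.insert c ((PySem.List.pyGet? asciiLower j).getD '?'), j + 1)
      let r := goA dj.1 dj.2 cs
      (r.1, dj.1.getD c '?' :: r.2.1, r.2.2)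
    else
      let r := goA d j cs
      (r.1, c :: r.2.1, r.2.2)

-- the first-appearance distinct-letter list accumulated left to right
def scanT (P cs : List Char) : List Char :=
  cs.foldl (fun acc c => if PySem.Chars.isalpha c then PySem.Set.add acc c else acc) P

lemma pairsT_append (Q P : List Char) (j : Int) :
    pairsT j (P ++ Q) = pairsT j P ++ pairsT (j + P.length) Q := by
  induction P generalizing j with
  | nil => simp [pairsT]
  | cons c P ih =>
      simp only [List.cons_append, pairsT, ih, List.length_cons, List.cons.injEq, true_and]
      congr 2
      push_cast; ring

lemma keys_pairsT (P : List Char) (j : Int) : (pairsT j P).map Prod.fst = P := by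
  induction P generalizing j with
  | nil => rfl
  | cons c P ih => simp [pairsT, ih]

lemma set_append_length (out cs : List Char) (c v : Char) :
    (out ++ c :: cs).set out.length v = out ++ v :: cs := by
  induction out with
  | nil => rfl
  | cons x out ih => simp [ih]

lemma contains_pairsT (P : List Char) (j : Int) (c : Char) :
    (PySem.Dict.mk (pairsT j P)).contains c = decide (c ∈ P) := by
  rw [PySem.Dict.contains_eq_decide_mem_keys]
  simp [PySem.Dict.keys, keys_pairsT]

lemma get?_pairsT_append_of_mem (P : List Char) (j : Int) (R : List (Char × Char)) (c : Char)
    (hc : c ∈ P) : (PySem.Dict.mk (pairsT j P ++ R)).get? c = (PySem.Dict.mk (pairsT j P)).get? c := by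
  induction P generalizing j with
  | nil => cases hc
  | cons p P ih =>
      simp only [pairsT, List.cons_append, PySem.Dict.get?_mk_cons]
      by_cases h : p = c
      · simp [h]
      · have : c ∈ P := by cases List.mem_cons.mp hc with
          | inl h' => exact absurd h'.symm h
          | inr h' => exact h'
        simp [h, ih _ this]

-- the dict's value at c, when c first appears after the prefix P₁
lemma get?_pairsT_mid (P₁ P₂ : List Char) (j : Int) (c : Char) (hc : c ∉ P₁) :
    (PySem.Dict.mk (pairsT j (P₁ ++ c :: P₂))).get? c
      = some ((PySem.List.pyGet? asciiLower (j + P₁.length)).getD '?') := by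
  induction P₁ generalizing j with
  | nil => simp [pairsT, PySem.Dict.get?_mk_cons]
  | cons p P₁ ih =>
      have h1 : ¬ (p = c) := fun h => hc (h ▸ List.mem_cons_self ..)
      have h2 : c ∉ P₁ := fun h => hc (List.mem_cons_of_mem _ h)
      simp only [List.cons_append, pairsT, PySem.Dict.get?_mk_cons, h1, List.length_cons]
      rw [if_neg (by simpa using h1), ih _ h2]
      have : j + (((P₁.length + 1 : Nat)) : Int) = j + 1 + (P₁.length : Int) := by push_cast; ring
      rw [this]

lemma tblT_snoc (P : List Char) (c : Char) (hc : c ∉ P) :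
    tblT (P ++ [c]) = (tblT P).insert c ((PySem.List.pyGet? asciiLower (P.length : Int)).getD '?') := by
  apply PySem.Dict.ext
  rw [PySem.Dict.items_insert_of_not_contains]
  · show pairsT 0 (P ++ [c]) = pairsT 0 P ++ [(c, _)]
    rw [pairsT_append]
    simp [pairsT]
  · show (PySem.Dict.mk (pairsT 0 P)).contains c = false
    rw [contains_pairsT]
    simpa using hc

lemma scanT_cons (P : List Char) (c : Char) (cs : List Char) :
    scanT P (c :: cs) = scanT (if PySem.Chars.isalpha c then PySem.Set.add P c else P) cs := by
  simp [scanT]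

lemma add_of_mem (P : List Char) (c : Char) (hc : c ∈ P) : PySem.Set.add P c = P := by
  simp [PySem.Set.add, PySem.Set.contains, hc]

lemma add_of_not_mem (P : List Char) (c : Char) (hc : c ∉ P) : PySem.Set.add P c = P ++ [c] := by
  simp [PySem.Set.add, PySem.Set.contains, hc]

lemma scanT_exists (cs : List Char) : ∀ P, ∃ Q, scanT P cs = P ++ Q ∧ ∀ x ∈ Q, x ∉ P := by
  induction cs with
  | nil => exact fun P => ⟨[], by simp [scanT]⟩
  | cons c cs ih =>
      intro P
      rw [scanT_cons]
      by_cases ha : PySem.Chars.isalpha c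
      · by_cases hm : c ∈ P
        · simpa [ha, add_of_mem P c hm] using ih P
        · obtain ⟨Q, hQ, hout⟩ := ih (P ++ [c])
          refine ⟨c :: Q, ?_, ?_⟩
          · simp [ha, add_of_not_mem P c hm, hQ]
          · intro x hx
            cases List.mem_cons.mp hx with
            | inl h => exact h ▸ hm
            | inr h => exact fun hp => hout x h (by simp [hp])
      · simpa [ha] using ih P

-- Set.add-folding only ever appends fresh elements on the right
lemma foldlAdd_exists (cs : List Char) : ∀ P, ∃ Q, cs.foldl PySem.Set.add P = P ++ Q ∧ ∀ x ∈ Q, x ∉ P := by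
  induction cs with
  | nil => exact fun P => ⟨[], by simp⟩
  | cons c cs ih =>
      intro P
      rw [List.foldl_cons]
      by_cases hm : c ∈ P
      · simpa [add_of_mem P c hm] using ih P
      · obtain ⟨Q, hQ, hout⟩ := ih (P ++ [c])
        refine ⟨c :: Q, ?_, ?_⟩
        · simp [add_of_not_mem P c hm, hQ]
        · intro x hx
          cases List.mem_cons.mp hx with
          | inl h => exact h ▸ hm
          | inr h => exact fun hp => hout x h (by simp [hp])

lemma get?_tblT_scanT (cs P : List Char) (c : Char) (hc : c ∈ P) :
    (tblT (scanT P cs)).get? c = (tblT P).get? c := by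
  obtain ⟨Q, hQ, -⟩ := scanT_exists cs P
  rw [hQ]
  show (PySem.Dict.mk (pairsT 0 (P ++ Q))).get? c = _
  rw [pairsT_append]
  exact get?_pairsT_append_of_mem P 0 _ c hc

lemma goA_spec (cs : List Char) : ∀ P : List Char,
    (goA (tblT P) (P.length : Int) cs).2.1
      = cs.map (fun c => if PySem.Chars.isalpha c then ((tblT (scanT P cs)).get? c).getD '?' else c) := by
  induction cs with
  | nil => intro P; rfl
  | cons c cs ih =>
      intro P
      by_cases ha : PySem.Chars.isalpha c
      · rw [scanT_cons]
        simp only [ha, if_true]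
        by_cases hm : c ∈ P
        · have hcont : (tblT P).contains c = true := by
            rw [show tblT P = PySem.Dict.mk (pairsT 0 P) from rfl, contains_pairsT]; simpa using hm
          rw [add_of_mem P c hm]
          simp only [goA, ha, hcont, if_true, List.map_cons]
          refine congrArg₂ List.cons ?_ (ih P)
          rw [PySem.Dict.getD_eq_get?_getD, get?_tblT_scanT cs P c hm]
        · have hcont : (tblT P).contains c = false := by
            rw [show tblT P = PySem.Dict.mk (pairsT 0 P) from rfl, contains_pairsT]; simpa using hm
          have hsnoc := tblT_snoc P c hm
          have hlen : ((P ++ [c]).length : Int) = (P.length : Int) + 1 := by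
            simp
          rw [add_of_not_mem P c hm]
          simp only [goA, ha, hcont, if_true, if_false, Bool.false_eq_true, List.map_cons]
          refine congrArg₂ List.cons ?_ ?_
          · rw [get?_tblT_scanT cs (P ++ [c]) c (by simp), hsnoc,
                PySem.Dict.get?_insert_self, PySem.Dict.getD_eq_get?_getD,
                PySem.Dict.get?_insert_self]
          · have := ih (P ++ [c])
            rw [hsnoc, hlen] at this
            exact this
      · rw [scanT_cons]
        simp only [goA, ha, if_false, Bool.false_eq_true, List.map_cons]
        refine congrArg₂ List.cons rfl (ih P)

lemma foldl_stepA (el : List Char) : ∀ (cs out : List Char) (d : PySem.Dict Char Char) (j : Int),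
    el.drop out.length = cs →
    (PySem.List.pyRange (out.length : Int) (el.length : Int) 1).foldl (stepA el) (d, out ++ cs, j)
      = ((goA d j cs).1, out ++ (goA d j cs).2.1, (goA d j cs).2.2) := by
  intro cs
  induction cs with
  | nil =>
      intro out d j hdrop
      have hle : el.length ≤ out.length := by
        by_contra h
        have := List.drop_eq_nil_iff.mp hdrop
        omega
      rw [PySem.List.pyRange_one_eq_nil (by exact_mod_cast hle)]
      simp [goA]
  | cons c cs ih =>
      intro out d j hdrop
      have hlt : out.length < el.length := by
        by_contra h
        rw [List.drop_eq_nil_iff.mpr (by omega)] at hdrop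
        cases hdrop
      have hget : el[out.length]? = some c := by
        have h0 : (el.drop out.length)[0]? = some c := by rw [hdrop]; rfl
        rwa [List.getElem?_drop, Nat.add_zero] at h0
      rw [PySem.List.pyRange_one_cons (by exact_mod_cast hlt)]
      rw [List.foldl_cons]
      have hstep : stepA el (d, out ++ c :: cs, j) (out.length : Int)
          = (if PySem.Chars.isalpha c then
               (let dj := if d.contains c then (d, j)
                          else (d.insert c ((PySem.List.pyGet? asciiLower j).getD '?'), j + 1)
                (dj.1, out ++ dj.1.getD c '?' :: cs, dj.2))
             else (d, out ++ c :: cs, j)) := by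
        show (let c' := PySem.List.pyGetD el (out.length : Int) ' '; _) = _
        have hc' : PySem.List.pyGetD el (out.length : Int) ' ' = c := by
          rw [PySem.List.pyGetD_natCast, List.getD_eq_getElem?_getD, hget]; rfl
        simp only [stepA, hc']
        by_cases ha : PySem.Chars.isalpha c
        · simp only [ha, if_true, PySem.List.pySetD_natCast, set_append_length]
        · simp [ha]
      rw [hstep]
      by_cases ha : PySem.Chars.isalpha c
      · simp only [ha, if_true]
        by_cases hm : d.contains c
        · simp only [hm, if_true]
          have h1 : el.drop (out.length + 1) = cs := by
            have := congrArg List.tail hdrop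
            simpa [List.tail_drop] using this
          have := ih (out ++ [d.getD c '?']) d j (by simpa using h1)
          simp only [List.length_append, List.length_cons, List.length_nil] at this ⊢
          rw [show (out ++ [d.getD c '?']) ++ cs = out ++ d.getD c '?' :: cs by simp] at this
          rw [show ((out.length + 1 : Nat) : Int) = (out.length : Int) + 1 by push_cast; ring] at this
          rw [this]
          simp [goA, ha, hm]
        · simp only [hm, if_false, Bool.false_eq_true]
          set d' := d.insert c ((PySem.List.pyGet? asciiLower j).getD '?') with hd'
          have := ih (out ++ [d'.getD c '?']) d' (j + 1)
            (by
              have h1 : el.drop (out.length + 1) = cs := by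
                have := congrArg List.tail hdrop
                simpa [List.tail_drop] using this
              simpa using h1)
          simp only [List.length_append, List.length_cons, List.length_nil] at this ⊢
          rw [show (out ++ [d'.getD c '?']) ++ cs = out ++ d'.getD c '?' :: cs by simp] at this
          rw [show ((out.length + 1 : Nat) : Int) = (out.length : Int) + 1 by push_cast; ring] at this
          rw [this]
          simp [goA, ha, hm, hd']
      · simp only [ha, if_false, Bool.false_eq_true]
        have h1 : el.drop (out.length + 1) = cs := by
          have := congrArg List.tail hdrop
          simpa [List.tail_drop] using this
        have := ih (out ++ [c]) d j (by simpa using h1)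
        simp only [List.length_append, List.length_cons, List.length_nil] at this ⊢
        rw [show (out ++ [c]) ++ cs = out ++ c :: cs by simp] at this
        rw [show ((out.length + 1 : Nat) : Int) = (out.length : Int) + 1 by push_cast; ring] at this
        rw [this]
        simp [goA, ha]

lemma scanT_eq_foldl_add (cs : List Char) : ∀ P, scanT P cs = (cs.filter PySem.Chars.isalpha).foldl PySem.Set.add P := by
  induction cs with
  | nil => intro P; rfl
  | cons c cs ih =>
      intro P
      rw [scanT_cons]
      rw [List.filter_cons]
      by_cases ha : PySem.Chars.isalpha c
      · simp [ha, ih]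
      · simp [ha, ih]

lemma scanT_nil_eq_ofList (cs : List Char) :
    scanT [] cs = PySem.Set.ofList (cs.filter PySem.Chars.isalpha) := by
  rw [scanT_eq_foldl_add, PySem.Set.ofList_eq_foldl]

-- the key bridge: for a letter c of el, A's table value at c is B's closed-form code
lemma tbl_value_eq_code (el : List Char) (c : Char) (ha : PySem.Chars.isalpha c = true) (hcel : c ∈ el) :
    ((tblT (scanT [] el)).get? c).getD '?'
      = (PySem.List.pyGet? asciiLower
          (((PySem.Set.ofList ((el.take ((PySem.List.index? el c).getD 0)).filter PySem.Chars.isalpha)).length : Int))).getD '?' := by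
  obtain ⟨k, hk⟩ := Option.isSome_iff_exists.mp ((PySem.List.index?_isSome_iff el c).mpr hcel)
  obtain ⟨pre, suf, hsplit, hlen, hnotin⟩ := (PySem.List.index?_eq_some_iff ..).mp hk
  have htake : el.take k = pre := by
    rw [hsplit, ← hlen, List.take_left]
  have hfil : el.filter PySem.Chars.isalpha
      = pre.filter PySem.Chars.isalpha ++ c :: suf.filter PySem.Chars.isalpha := by
    rw [hsplit]; simp [List.filter_append, List.filter_cons, ha]
  set A0 := PySem.Set.ofList (pre.filter PySem.Chars.isalpha) with hA0
  have hcA0 : c ∉ A0 := fun h =>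
    hnotin (List.mem_filter.mp ((PySem.Set.mem_ofList ..).mp h)).1
  obtain ⟨Q, hQ, -⟩ := foldlAdd_exists (suf.filter PySem.Chars.isalpha) (A0 ++ [c])
  have hD : scanT [] el = A0 ++ c :: Q := by
    rw [scanT_nil_eq_ofList, hfil, PySem.Set.ofList_eq_foldl, List.foldl_append, List.foldl_cons,
        ← PySem.Set.ofList_eq_foldl, ← hA0, add_of_not_mem A0 c hcA0, hQ]
    simp
  rw [hD, hk, Option.getD_some, htake]
  rw [show (tblT (A0 ++ c :: Q)).get? c = _ from get?_pairsT_mid A0 Q 0 c hcA0]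
  rw [← hA0]
  simp

-- ===== VERDICT =====
theorem encode_vars_spec : Claim_equal_encode_vars := by
  unfold Claim_equal_encode_vars
  intro expr _ _
  unfold Spec_encode_vars encode_vars encode_vars_alt
  show String.mk ((PySem.List.pyRange 0 (PySem.Str.len expr) 1).foldl (stepA expr.toList)
        (PySem.Dict.empty, expr.toList, 0)).2.1
      = String.mk (expr.toList.map (fun c => if PySem.Chars.isalpha c then
          (PySem.List.pyGet? asciiLower
            (((PySem.Set.ofList ((expr.toList.take ((PySem.List.index? expr.toList c).getD 0)).filter
                PySem.Chars.isalpha)).length : Int))).getD '?'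
          else c))
  have hA := foldl_stepA expr.toList expr.toList [] PySem.Dict.empty 0 (by simp)
  simp only [List.length_nil, Nat.cast_zero, List.nil_append] at hA
  have hlen : PySem.Str.len expr = (expr.toList.length : Int) := by simp
  rw [hlen, hA]
  have hgo : (goA PySem.Dict.empty 0 expr.toList).2.1
      = expr.toList.map (fun c => if PySem.Chars.isalpha c = true
          then ((tblT (scanT [] expr.toList)).get? c).getD '?' else c) := by
    have := goA_spec expr.toList []
    simpa using this
  rw [hgo]
  refine congrArg String.mk (List.map_congr_left ?_)
  intro c hc
  by_cases ha : PySem.Chars.isalpha c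
  · simp only [ha, if_true]
    exact tbl_value_eq_code expr.toList c ha hc
  · simp [ha]
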